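-- pv_equiv track=rewrite | github.com/0th4r-le-bgde42/Training | ExamR3/Train/exercises.py | py_string_sculptor
-- ===== SOURCE A (Python) =====
-- def py_string_sculptor(text: str) -> str:
-- 	res = ""
-- 	i = 0
-- 	for c in text:
-- 		if c.isalpha():
-- 			res += c.lower() if i % 2 == 0 else c.upper()
-- 			i += 1
-- 		else:
-- 			res += c
-- 	return res
-- ===== SOURCE B (Python) =====
-- def py_string_sculptor(text: str) -> str:
--     # Phase 1: collect the alphabetic characters.
--     letters = [c for c in text if c.isalpha()]
--     # Phase 2: transform them by their letter index.
--     transformed = [c.lower() if j % 2 == 0 else c.upper() for j, c in enumerate(letters)]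
--     # Phase 3: reinject the transformed letters into the original text.
--     it = iter(transformed)
--     out = []
--     for c in text:
--         out.append(next(it) if c.isalpha() else c)
--     return "".join(out)
-- ===== Notes on version B (the rewrite author's own statement) =====
-- stated objective: alternative
-- what changed: Replaces A's single interleaved pass with a counter by a three-phase collect/transform/reinject pipeline: filter the letters, case-map them by index, then walk the text again consuming them from an iterator.
import Mathlib
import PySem

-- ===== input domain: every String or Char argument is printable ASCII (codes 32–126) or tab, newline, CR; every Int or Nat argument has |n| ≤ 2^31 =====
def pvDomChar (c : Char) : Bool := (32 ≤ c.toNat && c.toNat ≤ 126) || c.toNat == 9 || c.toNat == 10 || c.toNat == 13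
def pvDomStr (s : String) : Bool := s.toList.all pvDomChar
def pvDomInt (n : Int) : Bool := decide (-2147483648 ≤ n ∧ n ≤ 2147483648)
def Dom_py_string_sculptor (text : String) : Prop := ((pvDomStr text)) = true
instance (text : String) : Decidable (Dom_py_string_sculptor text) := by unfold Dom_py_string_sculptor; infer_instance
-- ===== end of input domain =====

-- B rebuilds the result in three phases (filter letters, case-map by index, reinject) instead of A's single counter pass; same value, alternative structure.

-- ===== PORT A =====
-- A: one pass over the text, accumulating the result string and a letter counter i.
def py_string_sculptor (text : String) : String :=
  String.mk (text.toList.foldl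
    (fun (st : List Char × Int) c =>
      if PySem.Chars.isalpha c then
        (st.1 ++ [if st.2 % 2 == 0 then PySem.Chars.lowerChar c else PySem.Chars.upperChar c], st.2 + 1)
      else
        (st.1 ++ [c], st.2))
    ([], 0)).1

-- ===== PORT B =====
-- B phase 3: walk the text, copying non-letters and consuming the next transformed letter
-- for each alphabetic position (the iterator can never be exhausted at a letter).
def pvReinject : List Char → List Char → List Char
  | [], _ => []
  | c :: rest, it =>
    if PySem.Chars.isalpha c then
      match it with
      | t :: it' => t :: pvReinject rest it'
      | [] => pvReinject rest []   -- unreachable: transformed has one entry per letter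
    else c :: pvReinject rest it

def py_string_sculptor_alt (text : String) : String :=
  let cs := text.toList
  let letters := cs.filter PySem.Chars.isalpha
  let transformed := (PySem.List.enumerate letters 0).map
    (fun p => if p.1 % 2 == 0 then PySem.Chars.lowerChar p.2 else PySem.Chars.upperChar p.2)
  String.mk (pvReinject cs transformed)

-- ===== PRECONDITION & SPEC =====
def Spec_py_string_sculptor (text : String) (out : String) : Prop := out = py_string_sculptor_alt text
instance (text : String) (out : String) : Decidable (Spec_py_string_sculptor text out) := by unfold Spec_py_string_sculptor; infer_instance

-- ===== CLAIM (what is proved, stated in full; the proofs are below) =====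
def Claim_equal_py_string_sculptor : Prop := ∀ (text : String), Dom_py_string_sculptor text → Spec_py_string_sculptor text (py_string_sculptor text)

-- ===== LEMMAS AND PROOFS =====

theorem pv_loop_eq (cs : List Char) : ∀ (acc : List Char) (i : Int),
    (cs.foldl
      (fun (st : List Char × Int) c =>
        if PySem.Chars.isalpha c then
          (st.1 ++ [if st.2 % 2 == 0 then PySem.Chars.lowerChar c else PySem.Chars.upperChar c], st.2 + 1)
        else
          (st.1 ++ [c], st.2))
      (acc, i)).1
    = acc ++ pvReinject cs ((PySem.List.enumerate (cs.filter PySem.Chars.isalpha) i).map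
        (fun p => if p.1 % 2 == 0 then PySem.Chars.lowerChar p.2 else PySem.Chars.upperChar p.2)) := by
  induction cs with
  | nil => intro acc i; simp [pvReinject]
  | cons c rest ih =>
    intro acc i
    rw [List.foldl_cons]
    by_cases h : PySem.Chars.isalpha c = true
    · simp only [h, if_true]
      rw [ih]
      simp [pvReinject, h, PySem.List.enumerate_cons]
    · simp only [h]
      rw [ih]
      simp [pvReinject, h]

-- ===== VERDICT (by name: the statement is the Claim_ definition above) =====
theorem py_string_sculptor_spec : Claim_equal_py_string_sculptor := by
  intro text _
  unfold Spec_py_string_sculptor py_string_sculptor py_string_sculptor_alt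
  simp only [pv_loop_eq, List.nil_append]
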